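-- pv_equiv track=rewrite | github.com/sgh185/nautilus | scripts/testing/getboxplotPDFs.py | transformDataSets
-- ===== SOURCE A (Python) =====
-- def getIntList(data):
--     intSaveList = []
--     intYieldList = []
--     intRestoreList = []
--     intTotalList = []
--     d = data[:]
--     for x in d:
--         splitStr = x.split()
--         try:
--             intSaveList.append(abs(int(splitStr[0])))
--         except Exception:
--             continue
--         try:
--             intYieldList.append(abs(int(splitStr[1])))
--         except Exception:
--             continue
--         try:
--             intRestoreList.append(abs(int(splitStr[2])))
--         except Exception:
--             continue
--         try:
--             intTotalList.append(abs(int(splitStr[3])))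
--         except Exception:
--             continue
--
--
--     return intSaveList, intYieldList, intRestoreList, intTotalList
--
-- def transformDataSets(data):
-- 	# Current data sets pulled from qemu --- caveats:
-- 	# Ignore first 3 data sets
-- 	# Ignore first and last 3 entries in each set
-- 	# ^ Qemu cycle counters are thrown off at these points (possibly ???)
-- 	transformed = []
-- 	for string in data:
-- 		transformed.append(getIntList(string.splitlines())[2:])
-- 		# reasoning for [2:-3] --- first rdtsc is usually bad, second one
-- 		# is subtracting from 0.
--
-- 	joinedTransformed = []
-- 	for transform in transformed:
-- 		joinedTransformed.extend(transform)
--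
-- 	return joinedTransformed
-- ===== SOURCE B (Python) =====
-- def transformDataSets(data):
--     # Two accumulators per dataset (restore, total) in one pass, instead of
--     # four lists + an intermediate 'transformed' list + a join pass.
--     out = []
--     for ds in data:
--         restore, total = [], []
--         for line in ds.splitlines():
--             vals = []
--             for tok in line.split()[:4]:
--                 try:
--                     vals.append(abs(int(tok)))
--                 except ValueError:
--                     break
--             if len(vals) >= 3:
--                 restore.append(vals[2])
--                 if len(vals) >= 4:
--                     total.append(vals[3])
--         out.append(restore)
--         out.append(total)
--     return out
-- ===== Notes on version B (the rewrite author's own statement) =====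
-- stated objective: simpler
-- what changed: One pass with two accumulators (restore, total) per dataset replaces A's four parallel lists in getIntList, the intermediate 'transformed' list of tuple slices and the separate join loop; per line the first up-to-four columns are parsed as a prefix and the length of that prefix decides what is kept.
import Mathlib
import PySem

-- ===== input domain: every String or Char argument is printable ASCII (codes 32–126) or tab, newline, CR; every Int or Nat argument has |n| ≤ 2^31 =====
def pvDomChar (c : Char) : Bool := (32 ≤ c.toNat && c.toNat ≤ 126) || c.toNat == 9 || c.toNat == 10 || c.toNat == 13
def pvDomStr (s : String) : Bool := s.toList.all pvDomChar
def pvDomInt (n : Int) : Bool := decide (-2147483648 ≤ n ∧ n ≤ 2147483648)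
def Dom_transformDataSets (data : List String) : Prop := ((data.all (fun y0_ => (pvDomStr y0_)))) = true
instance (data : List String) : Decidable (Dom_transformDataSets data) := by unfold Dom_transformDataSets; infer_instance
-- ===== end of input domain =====

-- B replaces A's four parallel lists, tuple slicing and join pass by a single pass with two
-- accumulators per dataset (objective: simpler). Neither version mutates its argument.

-- ===== PORT A =====
-- body of A's per-line loop in getIntList (the try/append/continue chain);
-- abs(int(splitStr[i])) raises only in int()/indexing, modelled by the Option bind
def pvStepA (st : List Int × List Int × List Int × List Int) (x : String) :
    List Int × List Int × List Int × List Int :=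
  let p := PySem.Str.split₀ x
  match (PySem.List.pyGet? p 0).bind PySem.Int.ofStr? with
  | none => st
  | some v0 =>
    let st := (st.1 ++ [|v0|], st.2.1, st.2.2.1, st.2.2.2)
    match (PySem.List.pyGet? p 1).bind PySem.Int.ofStr? with
    | none => st
    | some v1 =>
      let st := (st.1, st.2.1 ++ [|v1|], st.2.2.1, st.2.2.2)
      match (PySem.List.pyGet? p 2).bind PySem.Int.ofStr? with
      | none => st
      | some v2 =>
        let st := (st.1, st.2.1, st.2.2.1 ++ [|v2|], st.2.2.2)
        match (PySem.List.pyGet? p 3).bind PySem.Int.ofStr? with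
        | none => st
        | some v3 => (st.1, st.2.1, st.2.2.1, st.2.2.2 ++ [|v3|])

def getIntList (data : List String) : List Int × List Int × List Int × List Int :=
  -- d = data[:] is an identical copy of an immutable-here list
  data.foldl pvStepA ([], [], [], [])

def transformDataSets (data : List String) : List (List Int) :=
  -- getIntList(...)[2:] is the tuple (restore, total), appended as the pair [r, t]
  let transformed : List (List (List Int)) :=
    data.foldl (fun acc s =>
      let g := getIntList (PySem.Str.splitlines s)
      acc ++ [[g.2.2.1, g.2.2.2]]) []
  transformed.foldl (fun j tr => j ++ tr) []

-- ===== PORT B =====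
-- the inner for-tok loop: parse abs(int(tok)) for each token, break (stop) at the first ValueError
def pvCollect : List String → List Int
  | [] => []
  | tok :: rest =>
    match PySem.Int.ofStr? tok with
    | none => []
    | some v => |v| :: pvCollect rest

def pvLineStep (st : List Int × List Int) (line : String) : List Int × List Int :=
  let vals := pvCollect (PySem.List.slice (PySem.Str.split₀ line) none (some 4))
  match vals with
  | _ :: _ :: v2 :: rest =>              -- len(vals) >= 3; vals[2] = v2
    match rest with
    | v3 :: _ => (st.1 ++ [v2], st.2 ++ [v3])  -- len(vals) >= 4; vals[3] = v3
    | [] => (st.1 ++ [v2], st.2)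
  | _ => st

def transformDataSets_alt (data : List String) : List (List Int) :=
  data.foldl (fun out ds =>
    let rt := (PySem.Str.splitlines ds).foldl pvLineStep ([], [])
    out ++ [rt.1, rt.2]) []

-- ===== PRECONDITION & SPEC =====
def Spec_transformDataSets (data : List String) (out : List (List Int)) : Prop := out = transformDataSets_alt data
instance (data : List String) (out : List (List Int)) : Decidable (Spec_transformDataSets data out) := by unfold Spec_transformDataSets; infer_instance

-- ===== CLAIM (what is proved, stated in full; the proofs are below) =====
def Claim_equal_transformDataSets : Prop := ∀ (data : List String), Dom_transformDataSets data → Spec_transformDataSets data (transformDataSets data)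

-- ===== LEMMAS AND PROOFS =====

-- A's per-line step, projected to its (restore, total) components, is B's line step
theorem pvStepA_proj (st : List Int × List Int × List Int × List Int) (x : String) :
    (pvStepA st x).2.2 = pvLineStep st.2.2 x := by
  obtain ⟨s, y, r, t⟩ := st
  simp only [pvStepA, pvLineStep]
  rcases hp : PySem.Str.split₀ x with _ | ⟨a, _ | ⟨b, _ | ⟨c, _ | ⟨d, rest⟩⟩⟩⟩
  · simp [PySem.List.pyGet?_of_nonneg, PySem.List.slice, PySem.List.clampIdx, pvCollect]
  · rcases h0 : PySem.Int.ofStr? a with _ | v0 <;>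
      simp [PySem.List.pyGet?_of_nonneg, PySem.List.slice, PySem.List.clampIdx,
        pvCollect, h0]
  · rcases h0 : PySem.Int.ofStr? a with _ | v0 <;>
      rcases h1 : PySem.Int.ofStr? b with _ | v1 <;>
      simp [PySem.List.pyGet?_of_nonneg, PySem.List.slice, PySem.List.clampIdx,
        pvCollect, h0, h1]
  · rcases h0 : PySem.Int.ofStr? a with _ | v0 <;>
      rcases h1 : PySem.Int.ofStr? b with _ | v1 <;>
      rcases h2 : PySem.Int.ofStr? c with _ | v2 <;>
      simp [PySem.List.pyGet?_of_nonneg, PySem.List.slice, PySem.List.clampIdx,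
        pvCollect, h0, h1, h2]
  · rcases h0 : PySem.Int.ofStr? a with _ | v0 <;>
      rcases h1 : PySem.Int.ofStr? b with _ | v1 <;>
      rcases h2 : PySem.Int.ofStr? c with _ | v2 <;>
      rcases h3 : PySem.Int.ofStr? d with _ | v3 <;>
      simp [PySem.List.pyGet?_of_nonneg, PySem.List.slice, PySem.List.clampIdx,
        pvCollect, h0, h1, h2, h3]

theorem foldA_proj (lines : List String) (st : List Int × List Int × List Int × List Int) :
    (lines.foldl pvStepA st).2.2 = lines.foldl pvLineStep st.2.2 := by
  induction lines generalizing st with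
  | nil => rfl
  | cons x xs ih => simp only [List.foldl_cons, ih, pvStepA_proj]

theorem foldA_acc (data : List String) (f : String → List (List Int))
    (acc : List (List (List Int))) :
    data.foldl (fun a s => a ++ [f s]) acc = acc ++ data.map (fun s => f s) := by
  induction data generalizing acc with
  | nil => simp
  | cons x xs ih => simp [ih]

theorem join_acc (l : List (List (List Int))) (acc : List (List Int)) :
    l.foldl (fun j tr => j ++ tr) acc = acc ++ l.flatten := by
  induction l generalizing acc with
  | nil => simp
  | cons x xs ih => simp [ih]

theorem foldB_acc (data : List String) (g : String → List Int × List Int)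
    (acc : List (List Int)) :
    data.foldl (fun out ds => out ++ [(g ds).1, (g ds).2]) acc
      = acc ++ data.flatMap (fun ds => [(g ds).1, (g ds).2]) := by
  induction data generalizing acc with
  | nil => simp
  | cons x xs ih => simp [ih]

-- ===== VERDICT (by name: the statement is the Claim_ definition above) =====
theorem transformDataSets_spec : Claim_equal_transformDataSets := by
  intro data _
  show transformDataSets data = transformDataSets_alt data
  unfold transformDataSets transformDataSets_alt
  rw [foldA_acc, join_acc,
    foldB_acc data (fun ds => (PySem.Str.splitlines ds).foldl pvLineStep ([], []))]
  simp only [List.nil_append, List.flatten_eq_flatMap, List.flatMap_map]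
  congr 1
  funext s
  have h := foldA_proj (PySem.Str.splitlines s) ([], [], [], [])
  simp only [getIntList, h]
  rfl
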